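-- pv_equiv track=rewrite | github.com/isawzz/vid_old | gsm/common/world/_old_grid_util.py | calc_hex_col_array
-- ===== SOURCE A (Python) =====
-- def calc_hex_col_array(rows, cols):
-- 	colarr = []  #how many cols in each row
-- 	for i in range(rows):
-- 		colarr.append(cols)
-- 		if i < (rows - 1) / 2:
-- 			cols += 1
-- 		else:
-- 			cols -= 1
-- 	return colarr
-- ===== SOURCE B (Python) =====
-- def calc_hex_col_array(rows, cols):
--     K = rows // 2
--     return [cols + 2 * min(i, K) - i for i in range(rows)]
-- ===== Notes on version B (the rewrite author's own statement) =====
-- stated objective: simpler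
-- what changed: Replaces the stateful rise-then-fall accumulation (running cols variable mutated each iteration with a branch) by a direct closed-form list comprehension cols + 2*min(i, rows//2) - i per index.
import Mathlib
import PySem

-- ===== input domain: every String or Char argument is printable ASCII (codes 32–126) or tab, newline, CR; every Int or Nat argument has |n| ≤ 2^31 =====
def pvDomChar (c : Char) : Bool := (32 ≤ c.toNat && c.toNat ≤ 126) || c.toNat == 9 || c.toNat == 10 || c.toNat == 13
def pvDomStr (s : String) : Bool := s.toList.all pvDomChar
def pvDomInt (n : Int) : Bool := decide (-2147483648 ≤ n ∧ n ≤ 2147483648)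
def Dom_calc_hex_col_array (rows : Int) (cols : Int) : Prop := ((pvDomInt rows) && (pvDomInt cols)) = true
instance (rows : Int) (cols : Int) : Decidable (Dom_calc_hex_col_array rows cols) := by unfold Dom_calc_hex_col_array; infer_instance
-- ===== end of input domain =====

-- B replaces A's stateful increment/decrement loop by a per-index closed form (simpler).

-- ===== PORT A =====
-- the float test `i < (rows - 1) / 2` is exact on |rows| ≤ 2^31 and is ported as `2*i < rows - 1`
def calc_hex_col_array (rows : Int) (cols : Int) : List Int :=
  ((PySem.List.pyRange 0 rows 1).foldl
    (fun (st : List Int × Int) i =>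
      (st.1 ++ [st.2], if 2 * i < rows - 1 then st.2 + 1 else st.2 - 1))
    ([], cols)).1

-- ===== PORT B =====
def calc_hex_col_array_alt (rows : Int) (cols : Int) : List Int :=
  let K := PySem.Int.floordiv rows 2
  (PySem.List.pyRange 0 rows 1).map (fun i => cols + 2 * min i K - i)

-- ===== PRECONDITION & SPEC =====
def Spec_calc_hex_col_array (rows : Int) (cols : Int) (out : List Int) : Prop := out = calc_hex_col_array_alt rows cols
instance (rows : Int) (cols : Int) (out : List Int) : Decidable (Spec_calc_hex_col_array rows cols out) := by unfold Spec_calc_hex_col_array; infer_instance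

-- ===== CLAIM (what is proved, stated in full; the proofs are below) =====
def Claim_equal_calc_hex_col_array : Prop := ∀ (rows : Int) (cols : Int), Dom_calc_hex_col_array rows cols → Spec_calc_hex_col_array rows cols (calc_hex_col_array rows cols)

-- ===== LEMMAS AND PROOFS =====

-- invariant: from position a with accumulator acc and running value c, A's fold
-- appends exactly the closed-form values, expressed relative to (a, c)
theorem calc_hex_foldl_inv (rows : Int) (n : Nat) :
    ∀ (a : Int) (acc : List Int) (c : Int), rows = a + n → 0 ≤ a →
    (((PySem.List.pyRange a rows 1).foldl
        (fun (st : List Int × Int) i =>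
          (st.1 ++ [st.2], if 2 * i < rows - 1 then st.2 + 1 else st.2 - 1))
        (acc, c)).1 : List Int)
      = acc ++ (PySem.List.pyRange a rows 1).map
          (fun i => c + 2 * min i (rows / 2) - 2 * min a (rows / 2) - i + a) := by
  induction n with
  | zero =>
    intro a acc c hra _
    rw [PySem.List.pyRange_one_eq_nil (by omega)]
    simp
  | succ m ih =>
    intro a acc c hra ha
    rw [PySem.List.pyRange_one_cons (by omega)]
    simp only [List.foldl_cons, List.map_cons]
    have hstep := ih (a + 1) (acc ++ [c])
      (if 2 * a < rows - 1 then c + 1 else c - 1) (by omega) (by omega)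
    rw [hstep]
    have hcond : (2 * a < rows - 1) ↔ (a < rows / 2) := by omega
    have hfun : (fun i => (if 2 * a < rows - 1 then c + 1 else c - 1)
          + 2 * min i (rows / 2) - 2 * min (a + 1) (rows / 2) - i + (a + 1))
        = (fun i => c + 2 * min i (rows / 2) - 2 * min a (rows / 2) - i + a) := by
      funext i
      by_cases h : a < rows / 2
      · rw [if_pos (hcond.mpr h)]
        rw [min_eq_left (by omega : a + 1 ≤ rows / 2), min_eq_left (by omega : a ≤ rows / 2)]
        ring
      · rw [if_neg (fun hc => h (hcond.mp hc))]
        rw [min_eq_right (by omega : rows / 2 ≤ a + 1), min_eq_right (by omega : rows / 2 ≤ a)]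
        ring
    rw [hfun]
    simp [List.append_assoc]

-- ===== VERDICT (by name: the statement is the Claim_ definition above) =====
theorem calc_hex_col_array_spec : Claim_equal_calc_hex_col_array := by
  intro rows cols _
  show _ = _
  unfold calc_hex_col_array calc_hex_col_array_alt
  by_cases hr : 0 ≤ rows
  · have hK : PySem.Int.floordiv rows 2 = rows / 2 :=
      PySem.Int.floordiv_eq_ediv_of_pos (by omega)
    rw [calc_hex_foldl_inv rows rows.toNat 0 [] cols (by omega) le_rfl]
    simp only [hK, List.nil_append]
    apply List.map_congr_left
    intro i hi
    have : 0 ≤ min (0 : Int) (rows / 2) := by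
      have : 0 ≤ rows / 2 := by omega
      omega
    have h0 : min (0 : Int) (rows / 2) = 0 := by omega
    rw [h0]; ring
  · rw [PySem.List.pyRange_one_eq_nil (by omega)]
    simp
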